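-- pv_equiv track=rewrite | github.com/krzemienski/ralph-orchestrator | src/ralph_orchestrator/onboarding/pattern_extractor.py | _generate_workflow_name
-- ===== SOURCE A (Python) =====
-- from typing import Any, Dict, List, Optional
--
-- def _generate_workflow_name(steps: List[str]) -> str:
--     """Generate a short name for a workflow.
--
--     Args:
--         steps: List of tool names in the workflow
--
--     Returns:
--         Short descriptive name like "read-edit-test"
--     """
--     if not steps:
--         return "empty"
--
--     # Take first few unique tools, lowercased
--     unique_tools = []
--     for tool in steps:
--         tool_lower = tool.lower().replace("mcp_", "").split("_")[0]
--         if tool_lower not in unique_tools: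
--             unique_tools.append(tool_lower)
--         if len(unique_tools) >= 3:
--             break
--
--     return "-".join(unique_tools)
-- ===== SOURCE B (Python) =====
-- def _generate_workflow_name(steps):
--     """Generate a short name for a workflow (recursive take-k formulation)."""
--     if not steps:
--         return "empty"
--     return "-".join(_pick(steps, 0, (), 3))
--
--
-- def _pick(steps, i, seen, k):
--     """First k prefixes taken from steps[i:] that are not in seen, consed on return."""
--     if k == 0:
--         return []
--     for j in range(i, len(steps)):
--         p = steps[j].lower().replace("mcp_", "").split("_")[0]
--         if p not in seen:
--             return [p] + _pick(steps, j + 1, seen + (p,), k - 1)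
--     return []
-- ===== Notes on version B (the rewrite author's own statement) =====
-- stated objective: alternative
-- what changed: Replaces A's single iterative loop with a capped accumulator, membership test and length-3 break by a recursive helper that carries a remaining-count k and the seen tuple: an inner index scan finds the next unseen prefix and the result is consed onto the recursive call with k-1, so the output is built front-to-back on return instead of appended to mutable state.
import Mathlib
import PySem

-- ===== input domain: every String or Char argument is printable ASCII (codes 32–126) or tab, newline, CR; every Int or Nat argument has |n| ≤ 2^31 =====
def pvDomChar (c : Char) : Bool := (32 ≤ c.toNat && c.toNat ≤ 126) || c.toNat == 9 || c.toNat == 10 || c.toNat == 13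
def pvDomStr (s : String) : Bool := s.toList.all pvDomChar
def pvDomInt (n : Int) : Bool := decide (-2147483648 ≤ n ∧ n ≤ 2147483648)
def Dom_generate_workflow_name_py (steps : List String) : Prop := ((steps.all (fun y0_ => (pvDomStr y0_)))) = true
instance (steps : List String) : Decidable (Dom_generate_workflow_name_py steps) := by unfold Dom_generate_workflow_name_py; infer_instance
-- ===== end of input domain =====

-- B replaces A's iterative capped-accumulator loop (membership test + length-3 break) by a
-- recursive take-k helper (inner index scan to the next unseen prefix, result consed on
-- return): a different decomposition with the same results.

-- shared by both ports: tool.lower().replace("mcp_", "").split("_")[0]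
-- (split? with the nonempty separator "_" always returns a nonempty list, so the
--  catch-all "" branch is unreachable; [0] never raises in Python here)
def pvPrefix (tool : String) : String :=
  match PySem.Str.split? (PySem.Str.replace (PySem.Str.lower tool) "mcp_" "") "_" with
  | some (h :: _) => h
  | _ => ""

-- ===== PORT A =====
-- the for-loop with the `not in` test and the `len >= 3` break
def pvALoop : List String → List String → List String
  | acc, [] => acc
  | acc, tool :: rest =>
    let tl := pvPrefix tool
    let acc' := if acc.contains tl then acc else acc ++ [tl]
    if 3 ≤ acc'.length then acc' else pvALoop acc' rest

def generate_workflow_name_py (steps : List String) : String :=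
  if steps = [] then "empty"
  else PySem.Str.join "-" (pvALoop [] steps)

-- ===== PORT B =====
-- _pick(steps, i, seen, k): the `for j in range(i, len(steps))` scan becomes the
-- structural recursion on the index j (same k while skipping seen prefixes),
-- and the `return [p] + _pick(..., k - 1)` branch is the cons with k - 1.
def pvPick (steps : List String) (i : Nat) (seen : List String) (k : Nat) : List String :=
  if k = 0 then []
  else if h : i < steps.length then
    let p := pvPrefix steps[i]
    if seen.contains p then pvPick steps (i + 1) seen k
    else p :: pvPick steps (i + 1) (seen ++ [p]) (k - 1)
  else []
termination_by steps.length - i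

def generate_workflow_name_py_alt (steps : List String) : String :=
  if steps = [] then "empty"
  else PySem.Str.join "-" (pvPick steps 0 [] 3)

-- ===== PRECONDITION & SPEC =====
def Spec_generate_workflow_name_py (steps : List String) (out : String) : Prop := out = generate_workflow_name_py_alt steps
instance (steps : List String) (out : String) : Decidable (Spec_generate_workflow_name_py steps out) := by unfold Spec_generate_workflow_name_py; infer_instance

-- ===== CLAIM =====
def Claim_equal_generate_workflow_name_py : Prop := ∀ (steps : List String), Dom_generate_workflow_name_py steps → Spec_generate_workflow_name_py steps (generate_workflow_name_py steps)

-- ===== LEMMAS AND PROOFS =====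

-- A's loop on the tail steps[i:] appends exactly the elements B's recursion conses,
-- as long as the cap is not yet hit
theorem pvALoop_eq_pick (steps : List String) :
    ∀ n i acc, steps.length - i = n → acc.length < 3 →
    pvALoop acc (steps.drop i) = acc ++ pvPick steps i acc (3 - acc.length) := by
  intro n
  induction n with
  | zero =>
    intro i acc hn h
    have hi : steps.length ≤ i := by omega
    rw [List.drop_eq_nil_of_le hi, pvALoop, pvPick,
      if_neg (by omega), dif_neg (by omega)]
    simp
  | succ n ih =>
    intro i acc hn h
    have hi : i < steps.length := by omega
    rw [List.drop_eq_getElem_cons hi, pvALoop, pvPick,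
      if_neg (show ¬(3 - acc.length = 0) by omega), dif_pos hi]
    by_cases hc : acc.contains (pvPrefix steps[i])
    · simp only [hc, if_true]
      rw [if_neg (show ¬(3 ≤ acc.length) by omega)]
      exact ih (i + 1) acc (by omega) h
    · simp only [hc, if_false, Bool.false_eq_true]
      by_cases h3 : 3 ≤ (acc ++ [pvPrefix steps[i]]).length
      · rw [if_pos h3]
        have hlen : acc.length = 2 := by simp at h3; omega
        have hz : 3 - acc.length - 1 = 0 := by omega
        rw [hz, pvPick, if_pos rfl]
      · rw [if_neg h3]
        have h' : (acc ++ [pvPrefix steps[i]]).length < 3 := by omega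
        rw [ih (i + 1) _ (by omega) h']
        have he : 3 - (acc ++ [pvPrefix steps[i]]).length = 3 - acc.length - 1 := by
          simp; omega
        rw [he]
        simp

-- ===== VERDICT =====
theorem generate_workflow_name_py_spec : Claim_equal_generate_workflow_name_py := by
  intro steps _
  unfold Spec_generate_workflow_name_py generate_workflow_name_py generate_workflow_name_py_alt
  by_cases h : steps = []
  · simp [h]
  · rw [if_neg h, if_neg h]
    have h1 := pvALoop_eq_pick steps steps.length 0 [] (by omega) (by simp)
    simp only [List.drop_zero, List.nil_append, List.length_nil, Nat.sub_zero] at h1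
    rw [h1]
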